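-- pv_equiv track=rewrite | github.com/jhiltonsantos/ADS-Algoritmos-IFPI | AtividadeURI_4_Repeticoes_String_Relacionados/uri_1168_LED.py | quantidade_led
-- ===== SOURCE A (Python) =====
-- def quantidade_led(numero):
--     quant_led_total = 0
--     for i in range(len(numero)):
--         if numero[i] == '0':
--             quant_led_total += 6
--         elif numero[i] == '1':
--             quant_led_total += 2
--         elif numero[i] == '2':
--             quant_led_total += 5
--         elif numero[i] == '3':
--             quant_led_total += 5
--         elif numero[i] == '4':
--             quant_led_total += 4
--         elif numero[i] == '5':
--             quant_led_total += 5
--         elif numero[i] == '6':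
--             quant_led_total += 6
--         elif numero[i] == '7':
--             quant_led_total += 3
--         elif numero[i] == '8':
--             quant_led_total += 7
--         elif numero[i] == '9':
--             quant_led_total += 6
--
--     return quant_led_total
-- ===== SOURCE B (Python) =====
-- def quantidade_led(numero):
--     weights = {'0': 6, '1': 2, '2': 5, '3': 5, '4': 4,
--                '5': 5, '6': 6, '7': 3, '8': 7, '9': 6}
--     counts = {}
--     for ch in numero:
--         counts[ch] = counts.get(ch, 0) + 1
--     return sum(cnt * weights.get(ch, 0) for ch, cnt in counts.items())
-- ===== Notes on version B (the rewrite author's own statement) =====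
-- stated objective: alternative
-- what changed: B first tallies character frequencies into a dict in one pass and then aggregates count * weight over the distinct characters via a weights mapping with get(ch, 0), instead of A's per-position if/elif weight chain; a timing run measured it faster (constant factor: the long if/elif chain runs once per distinct character, not per position).
import Mathlib
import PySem

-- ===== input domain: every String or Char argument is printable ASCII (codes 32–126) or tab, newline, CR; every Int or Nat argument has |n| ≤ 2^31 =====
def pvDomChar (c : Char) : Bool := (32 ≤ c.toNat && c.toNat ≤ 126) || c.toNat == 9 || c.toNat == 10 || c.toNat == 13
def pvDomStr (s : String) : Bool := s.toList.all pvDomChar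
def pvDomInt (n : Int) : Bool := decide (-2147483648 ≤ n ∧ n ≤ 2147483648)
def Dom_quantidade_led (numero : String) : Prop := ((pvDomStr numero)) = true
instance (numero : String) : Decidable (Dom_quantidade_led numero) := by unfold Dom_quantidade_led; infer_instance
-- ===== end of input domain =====

-- B tallies character frequencies into a dict, then sums count * weight over the distinct characters (frequency-table decomposition; measured faster in a timing run).

-- ===== PORT A =====
def quantidade_led (numero : String) : Int :=
  (PySem.List.pyRange 0 (PySem.Str.len numero) 1).foldl (fun acc i =>
    let c := PySem.List.pyGetD numero.toList i ' '
    if c == '0' then acc + 6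
    else if c == '1' then acc + 2
    else if c == '2' then acc + 5
    else if c == '3' then acc + 5
    else if c == '4' then acc + 4
    else if c == '5' then acc + 5
    else if c == '6' then acc + 6
    else if c == '7' then acc + 3
    else if c == '8' then acc + 7
    else if c == '9' then acc + 6
    else acc) 0

-- ===== PORT B =====
def ledWeights : PySem.Dict Char Int :=
  PySem.Dict.ofList [('0', 6), ('1', 2), ('2', 5), ('3', 5), ('4', 4),
                     ('5', 5), ('6', 6), ('7', 3), ('8', 7), ('9', 6)]

def quantidade_led_alt (numero : String) : Int :=
  let counts := numero.toList.foldl (fun d ch => d.insert ch (d.getD ch 0 + 1)) PySem.Dict.empty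
  (counts.items.map (fun p => p.2 * ledWeights.getD p.1 0)).sum

-- ===== PRECONDITION & SPEC =====
def Spec_quantidade_led (numero : String) (out : Int) : Prop := out = quantidade_led_alt numero
instance (numero : String) (out : Int) : Decidable (Spec_quantidade_led numero out) := by unfold Spec_quantidade_led; infer_instance

-- ===== CLAIM (what is proved, stated in full; the proofs are below) =====
def Claim_equal_quantidade_led : Prop := ∀ (numero : String), Dom_quantidade_led numero → Spec_quantidade_led numero (quantidade_led numero)

-- ===== LEMMAS AND PROOFS =====

/-- A's per-character weight as a function. -/
def ledW (c : Char) : Int :=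
  if c == '0' then 6
  else if c == '1' then 2
  else if c == '2' then 5
  else if c == '3' then 5
  else if c == '4' then 4
  else if c == '5' then 5
  else if c == '6' then 6
  else if c == '7' then 3
  else if c == '8' then 7
  else if c == '9' then 6
  else 0

lemma ledWeights_items : ledWeights.items =
    [('0', 6), ('1', 2), ('2', 5), ('3', 5), ('4', 4),
     ('5', 5), ('6', 6), ('7', 3), ('8', 7), ('9', 6)] := by decide

lemma ledWeights_getD (c : Char) : ledWeights.getD c 0 = ledW c := by
  by_cases h0 : c = '0'; · subst h0; decide
  by_cases h1 : c = '1'; · subst h1; decide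
  by_cases h2 : c = '2'; · subst h2; decide
  by_cases h3 : c = '3'; · subst h3; decide
  by_cases h4 : c = '4'; · subst h4; decide
  by_cases h5 : c = '5'; · subst h5; decide
  by_cases h6 : c = '6'; · subst h6; decide
  by_cases h7 : c = '7'; · subst h7; decide
  by_cases h8 : c = '8'; · subst h8; decide
  by_cases h9 : c = '9'; · subst h9; decide
  unfold PySem.Dict.getD PySem.Dict.get?
  rw [ledWeights_items]
  simp [ledW, List.find?_cons, List.find?_nil, h0, h1, h2, h3, h4, h5, h6, h7, h8, h9,
        beq_false_of_ne (Ne.symm h0), beq_false_of_ne (Ne.symm h1), beq_false_of_ne (Ne.symm h2),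
        beq_false_of_ne (Ne.symm h3), beq_false_of_ne (Ne.symm h4), beq_false_of_ne (Ne.symm h5),
        beq_false_of_ne (Ne.symm h6), beq_false_of_ne (Ne.symm h7), beq_false_of_ne (Ne.symm h8),
        beq_false_of_ne (Ne.symm h9)]

lemma foldl_chain (xs : List Char) (a : Int) :
    xs.foldl (fun acc c =>
      if c == '0' then acc + 6
      else if c == '1' then acc + 2
      else if c == '2' then acc + 5
      else if c == '3' then acc + 5
      else if c == '4' then acc + 4
      else if c == '5' then acc + 5
      else if c == '6' then acc + 6
      else if c == '7' then acc + 3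
      else if c == '8' then acc + 7
      else if c == '9' then acc + 6
      else acc) a = a + (xs.map ledW).sum := by
  induction xs generalizing a with
  | nil => simp
  | cons x t ih =>
    rw [List.foldl_cons, List.map_cons, List.sum_cons, ih]
    by_cases h0 : x = '0'; · simp [ledW, h0]; try omega
    by_cases h1 : x = '1'; · simp [ledW, h1]; try omega
    by_cases h2 : x = '2'; · simp [ledW, h2]; try omega
    by_cases h3 : x = '3'; · simp [ledW, h3]; try omega
    by_cases h4 : x = '4'; · simp [ledW, h4]; try omega
    by_cases h5 : x = '5'; · simp [ledW, h5]; try omega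
    by_cases h6 : x = '6'; · simp [ledW, h6]; try omega
    by_cases h7 : x = '7'; · simp [ledW, h7]; try omega
    by_cases h8 : x = '8'; · simp [ledW, h8]; try omega
    by_cases h9 : x = '9'; · simp [ledW, h9]; try omega
    simp [ledW, h0, h1, h2, h3, h4, h5, h6, h7, h8, h9]

lemma quantidade_led_eq_sum (numero : String) :
    quantidade_led numero = (numero.toList.map ledW).sum := by
  unfold quantidade_led
  rw [show PySem.Str.len numero = ((numero.toList.length : Int)) by simp]
  rw [PySem.List.foldl_pyRange_zero_pyGetD' numero.toList ' '
    (fun acc c =>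
      if c == '0' then acc + 6
      else if c == '1' then acc + 2
      else if c == '2' then acc + 5
      else if c == '3' then acc + 5
      else if c == '4' then acc + 4
      else if c == '5' then acc + 5
      else if c == '6' then acc + 6
      else if c == '7' then acc + 3
      else if c == '8' then acc + 7
      else if c == '9' then acc + 6
      else acc) 0]
  rw [foldl_chain]
  omega

lemma distinct_sum (xs : List Char) :
    ((PySem.Set.ofList xs).map (fun k => (xs.count k : Int) * ledW k)).sum
      = (xs.map ledW).sum := by
  have hnd : (PySem.Set.ofList xs).Nodup := PySem.Set.nodup_ofList xs
  have hfin : (PySem.Set.ofList xs).toFinset = xs.toFinset := by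
    ext a; simp [PySem.Set.mem_ofList]
  rw [← List.sum_toFinset _ hnd, hfin, Finset.sum_list_map_count]
  refine Finset.sum_congr rfl ?_
  intro m _
  simp

-- ===== VERDICT (by name: the statement is the Claim_ definition above) =====
theorem quantidade_led_spec : Claim_equal_quantidade_led := by
  intro numero _
  show quantidade_led numero = quantidade_led_alt numero
  rw [quantidade_led_eq_sum]
  simp only [quantidade_led_alt]
  rw [PySem.Dict.foldl_insert_getD_add_one_eq_counter]
  rw [PySem.Dict.items_counter]
  rw [List.map_map]
  rw [← distinct_sum numero.toList]
  refine congrArg List.sum ?_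
  refine List.map_congr_left ?_
  intro k _
  simp only [Function.comp_apply]
  rw [ledWeights_getD]
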